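-- pv_equiv track=rewrite | github.com/cohky16/atcoder | abc256/abc256_b/main.py | solve
-- ===== SOURCE A (Python) =====
-- def solve(N, A):
--     pass  # TODO: edit here
--     l = [0, 0, 0, 0]
--     p = 0
--     for i in range(N):
--         l[0] = 1
--         for j in reversed(range(4)):
--             if l[j]:
--                 if j + A[i] >= 4:
--                     l[j] = 0
--                     p += 1
--                 else:
--                     l[j+A[i]] = l[j]
--                     l[j] = 0
--     return p
-- ===== SOURCE B (Python) =====
-- def solve(N, A):
--     # Count suffix sums that reach the goal: ball i scores iff A[i]+...+A[N-1] >= 4.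
--     s = 0
--     p = 0
--     for i in reversed(range(N)):
--         s += A[i]
--         if s >= 4:
--             p += 1
--     return p
-- ===== Notes on version B (the rewrite author's own statement) =====
-- stated objective: simpler
-- what changed: B replaces the 4-square board simulation (mutable occupancy array with an inner reversed(range(4)) scan per turn) by a single O(1)-state backward pass (no per-turn board scan or list mutation) that keeps a running suffix sum and counts how many suffix sums A[i]+...+A[N-1] reach 4; Pre_ restricts to the problem's natural domain (N <= len(A), every moved value >= 1), since for values <= 0 A's returns come from accidental negative-index wraparound and silent ball clearing, and for N > len(A) or values <= -5 A raises IndexError.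
-- outside the precondition, e.g. on solve(2, [0, 4]): A returns 1, B returns 2; on solve(2, [-2, 5]): A returns 2, B returns 1
import Mathlib
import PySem

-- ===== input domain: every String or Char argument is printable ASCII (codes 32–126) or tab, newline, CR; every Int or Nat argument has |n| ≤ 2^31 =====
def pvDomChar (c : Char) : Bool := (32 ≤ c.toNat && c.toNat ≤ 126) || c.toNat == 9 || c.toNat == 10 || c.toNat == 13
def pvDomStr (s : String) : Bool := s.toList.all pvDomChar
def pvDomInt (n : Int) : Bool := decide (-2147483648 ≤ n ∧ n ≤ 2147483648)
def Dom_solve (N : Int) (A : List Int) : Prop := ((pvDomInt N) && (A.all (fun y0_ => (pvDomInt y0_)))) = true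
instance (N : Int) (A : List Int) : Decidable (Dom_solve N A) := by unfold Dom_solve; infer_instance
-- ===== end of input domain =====

-- B drops the 4-square board simulation for a single backward pass counting suffix sums ≥ 4;
-- objective: simpler (on the problem's natural domain stated by Pre_).

-- ===== PORT A =====
-- one iteration of the outer loop after 'l[0] = 1': 'for j in reversed(range(4)): …'
def solveInner (a : Int) (st : List Int × Int) : List Int × Int :=
  ((PySem.List.pyRange 0 4 1).reverse).foldl
    (fun st2 j =>
      if PySem.List.pyGetD st2.1 j 0 ≠ 0 then
        if j + a ≥ 4 then
          (PySem.List.pySetD st2.1 j 0, st2.2 + 1)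
        else
          (PySem.List.pySetD (PySem.List.pySetD st2.1 (j + a) (PySem.List.pyGetD st2.1 j 0)) j 0, st2.2)
      else st2)
    st

def solve (N : Int) (A : List Int) : Int :=
  ((PySem.List.pyRange 0 N 1).foldl
    (fun st i => solveInner (PySem.List.pyGetD A i 0) (PySem.List.pySetD st.1 0 1, st.2))
    ([0, 0, 0, 0], 0)).2

-- ===== PORT B =====
-- loop body: 's += a; if s >= 4: p += 1'
def altStep (st : Int × Int) (a : Int) : Int × Int :=
  let s := st.1 + a
  (s, if 4 ≤ s then st.2 + 1 else st.2)

def solve_alt (N : Int) (A : List Int) : Int :=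
  (((PySem.List.pyRange 0 N 1).reverse).foldl
    (fun st i => altStep st (PySem.List.pyGetD A i 0)) (0, 0)).2

-- ===== PRECONDITION & SPEC =====
-- Pre_ restricts to the problem's natural domain (N ≤ len(A), every moved value ≥ 1):
-- for values ≤ 0 A's returns come from accidental negative-index wraparound and silent
-- ball clearing; for N > len(A) or values ≤ -5 A raises IndexError.
def Pre_solve (N : Int) (A : List Int) : Prop :=
  N ≤ (A.length : Int) ∧ ∀ x ∈ A.take N.toNat, 1 ≤ x
instance (N : Int) (A : List Int) : Decidable (Pre_solve N A) := by unfold Pre_solve; infer_instance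
def pvWitness_solve : Int × List Int := (3, [1, 2, 4])
def Spec_solve (N : Int) (A : List Int) (out : Int) : Prop := out = solve_alt N A
instance (N : Int) (A : List Int) (out : Int) : Decidable (Spec_solve N A out) := by unfold Spec_solve; infer_instance

-- ===== CLAIM (what is proved, stated in full; the proofs are below) =====
def Claim_equal_solve : Prop := ∀ (N : Int) (A : List Int), Dom_solve N A → Pre_solve N A → Spec_solve N A (solve N A)

-- ===== LEMMAS AND PROOFS =====

-- Python's bool as 0/1
def bti (b : Bool) : Int := if b then 1 else 0

-- A's board after a turn, as a boolean state machine (only values ≥ 1 reach this)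
def solveStep (st : Int × Bool × Bool × Bool) (a : Int) : Int × Bool × Bool × Bool :=
  match st with
  | (p, b1, b2, b3) =>
    if 4 ≤ a then (p + 1 + bti b1 + bti b2 + bti b3, false, false, false)
    else if a = 3 then (p + bti b1 + bti b2 + bti b3, false, false, true)
    else if a = 2 then (p + bti b2 + bti b3, false, true, b1)
    else (p + bti b3, true, b1, b2)

-- number of nonempty suffixes of xs whose sum, shifted by s, reaches 4
def suffC (s : Int) : List Int → Int
  | [] => 0
  | x :: xs => suffC s xs + (if 4 ≤ s + x + xs.sum then 1 else 0)

def encB (st : Int × Bool × Bool × Bool) : List Int × Int :=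
  ([0, bti st.2.1, bti st.2.2.1, bti st.2.2.2], st.1)

set_option maxHeartbeats 2000000 in
lemma step_match (a p : Int) (b1 b2 b3 : Bool) (ha : 1 ≤ a) :
    solveInner a ([1, bti b1, bti b2, bti b3], p) = encB (solveStep (p, b1, b2, b3) a) := by
  have hr : (PySem.List.pyRange 0 4 1).reverse = [3, 2, 1, 0] := by decide
  by_cases h4 : 4 ≤ a
  · cases b1 <;> cases b2 <;> cases b3 <;>
      simp [solveInner, hr, solveStep, encB, bti, h4,
        PySem.List.pySetD, PySem.List.pySet?, PySem.List.pyIdx?,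
        PySem.List.pyGetD, PySem.List.pyGet?,
        show (3:Int) + a ≥ 4 from by omega, show (2:Int) + a ≥ 4 from by omega,
        show (1:Int) + a ≥ 4 from by omega]
  · have h3 : a ≤ 3 := by omega
    interval_cases a <;> cases b1 <;> cases b2 <;> cases b3 <;>
      simp [solveInner, hr, solveStep, encB, bti,
        PySem.List.pySetD, PySem.List.pySet?, PySem.List.pyIdx?,
        PySem.List.pyGetD, PySem.List.pyGet?]

lemma loop_match (xs : List Int) (h : ∀ x ∈ xs, 1 ≤ x) (st : Int × Bool × Bool × Bool) :
    xs.foldl (fun (q : List Int × Int) a => solveInner a (PySem.List.pySetD q.1 0 1, q.2)) (encB st)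
      = encB (xs.foldl solveStep st) := by
  induction xs generalizing st with
  | nil => rfl
  | cons x xs ih =>
    simp only [List.foldl_cons]
    have hx : 1 ≤ x := h x (List.mem_cons_self ..)
    have h' : ∀ y ∈ xs, 1 ≤ y := fun y hy => h y (List.mem_cons_of_mem _ hy)
    rw [show (PySem.List.pySetD (encB st).1 0 1, (encB st).2)
          = ([1, bti st.2.1, bti st.2.2.1, bti st.2.2.2], st.1) by
        simp [encB, PySem.List.pySetD, PySem.List.pySet?, PySem.List.pyIdx?]]
    rw [step_match _ _ _ _ _ hx]
    exact ih h' _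

lemma fold_take {S : Type} (A : List Int) (n : Nat) (hn : n ≤ A.length)
    (f : S → Int → S) (init : S) :
    ((List.range n).map (fun k : Nat => ((0:Int) + (k:Int)))).foldl
        (fun st i => f st (PySem.List.pyGetD A i 0)) init
      = (A.take n).foldl f init := by
  induction n generalizing init with
  | zero => rfl
  | succ m ih =>
    have hm : m < A.length := by omega
    rw [List.range_succ, List.map_append, List.foldl_append,
        List.take_add_one, List.foldl_append, ih (by omega)]
    simp only [List.map_cons, List.map_nil, List.foldl_cons, List.foldl_nil,
      List.getElem?_eq_getElem hm, Option.toList_some, zero_add]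
    rw [PySem.List.pyGetD_natCast]
    simp [List.getD, List.getElem?_eq_getElem hm]

lemma sum_nonneg_of (xs : List Int) (h : ∀ x ∈ xs, 1 ≤ x) : 0 ≤ xs.sum :=
  List.sum_nonneg (fun x hx => le_trans (by norm_num) (h x hx))

-- A's boolean state machine computes the suffix-crossing count
lemma key (xs : List Int) (h : ∀ x ∈ xs, 1 ≤ x) (p : Int) (b1 b2 b3 : Bool) :
    (xs.foldl solveStep (p, b1, b2, b3)).1 =
      p + (if b1 = true ∧ 4 ≤ 1 + xs.sum then 1 else 0)
        + (if b2 = true ∧ 4 ≤ 2 + xs.sum then 1 else 0)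
        + (if b3 = true ∧ 4 ≤ 3 + xs.sum then 1 else 0)
        + suffC 0 xs := by
  induction xs generalizing p b1 b2 b3 with
  | nil => simp [suffC]
  | cons x xs ih =>
    have hx : 1 ≤ x := h x (List.mem_cons_self ..)
    have h' : ∀ y ∈ xs, 1 ≤ y := fun y hy => h y (List.mem_cons_of_mem _ hy)
    have hs : 0 ≤ xs.sum := sum_nonneg_of xs h'
    simp only [List.foldl_cons]
    by_cases h4 : 4 ≤ x
    · rw [show solveStep (p, b1, b2, b3) x
            = (p + 1 + bti b1 + bti b2 + bti b3, false, false, false) by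
          simp [solveStep, h4]]
      rw [ih h']
      cases b1 <;> cases b2 <;> cases b3 <;>
        simp [bti, suffC, List.sum_cons] <;> split_ifs <;> omega
    · have hx3 : x ≤ 3 := by omega
      interval_cases x
      · rw [show solveStep (p, b1, b2, b3) 1 = (p + bti b3, true, b1, b2) by
            simp [solveStep]]
        rw [ih h']
        cases b1 <;> cases b2 <;> cases b3 <;>
          simp [bti, suffC, List.sum_cons] <;> split_ifs <;> omega
      · rw [show solveStep (p, b1, b2, b3) 2 = (p + bti b2 + bti b3, false, true, b1) by
            simp [solveStep]]
        rw [ih h']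
        cases b1 <;> cases b2 <;> cases b3 <;>
          simp [bti, suffC, List.sum_cons] <;> split_ifs <;> omega
      · rw [show solveStep (p, b1, b2, b3) 3
              = (p + bti b1 + bti b2 + bti b3, false, false, true) by
            simp [solveStep]]
        rw [ih h']
        cases b1 <;> cases b2 <;> cases b3 <;>
          simp [bti, suffC, List.sum_cons] <;> split_ifs <;> omega

-- B's backward pass computes the same count
lemma alt_fold (ys : List Int) (s p : Int) :
    ys.reverse.foldl altStep (s, p) = (s + ys.sum, p + suffC s ys) := by
  induction ys generalizing s p with
  | nil => simp [suffC]
  | cons x t ih =>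
    rw [List.reverse_cons, List.foldl_append, ih]
    simp only [List.foldl_cons, List.foldl_nil, altStep, suffC, List.sum_cons]
    refine Prod.ext (by ring) ?_
    by_cases hc : 4 ≤ s + x + t.sum
    · rw [if_pos (by omega), if_pos hc]; ring
    · rw [if_neg (by omega), if_neg hc]; simp

-- backward index loop over range(N) reads exactly the reversed prefix
lemma fold_take_rev (A : List Int) (n : Nat) (hn : n ≤ A.length) (st : Int × Int) :
    (((List.range n).map (fun k : Nat => ((k : Nat) : Int))).reverse).foldl
        (fun q i => altStep q (PySem.List.pyGetD A i 0)) st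
      = (A.take n).reverse.foldl altStep st := by
  induction n generalizing st with
  | zero => rfl
  | succ m ih =>
    have hm : m < A.length := by omega
    rw [List.range_succ, List.map_append, List.reverse_append, List.take_add_one]
    simp only [List.map_cons, List.map_nil, List.reverse_cons, List.reverse_nil,
      List.nil_append, List.singleton_append, List.foldl_cons,
      List.getElem?_eq_getElem hm, Option.toList_some, List.reverse_append]
    rw [PySem.List.pyGetD_natCast]
    simp only [List.getD, List.getElem?_eq_getElem hm, Option.getD_some]
    exact ih (by omega) _

-- ===== VERDICT (by name: the statement is the Claim_ definition above) =====
theorem solve_spec : Claim_equal_solve := by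
  intro N A _ hpre
  unfold Spec_solve
  rcases hpre with ⟨hN, hvals⟩
  have hn : N.toNat ≤ A.length := by omega
  unfold solve solve_alt
  rw [PySem.List.pyRange_one, show (N - 0).toNat = N.toNat from by omega]
  rw [fold_take A N.toNat hn
        (fun q a => solveInner a (PySem.List.pySetD q.1 0 1, q.2)) ([0,0,0,0], 0)]
  rw [show (([0,0,0,0], 0) : List Int × Int) = encB (0, false, false, false) from rfl,
      loop_match _ hvals]
  simp only [zero_add]
  rw [fold_take_rev A N.toNat hn, alt_fold]
  simp only [encB]
  rw [key _ hvals]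
  simp
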